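-- pv_equiv track=rewrite | github.com/Yoon-men/CodingTest | BaekJoon/17413.py | joyGo
-- ===== SOURCE A (Python) =====
-- def joyGo(s: str) -> str :
--     s = list(s)
--     idx = 0
--     while idx < len(s) :
--         if s[idx] == "<" :
--             idx += 1
--             while s[idx] != ">" : idx += 1
--             idx += 1
--         elif (s[idx].isalpha()) or (s[idx].isdigit()) :
--             startIdx = idx
--             while (idx < len(s)) and ((s[idx].isalpha()) or (s[idx].isdigit())) : idx += 1
--             tmpString = s[startIdx:idx][::-1]
--             s[startIdx:idx] = tmpString
--         else :
--             idx += 1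
--
--     return "".join(s)
-- ===== SOURCE B (Python) =====
-- def joyGo(s: str) -> str:
--     out = []
--     word = []
--     in_tag = False
--     for c in s:
--         if in_tag:
--             out.append(c)
--             if c == ">":
--                 in_tag = False
--         elif c == "<":
--             out.extend(reversed(word))
--             word.clear()
--             out.append(c)
--             in_tag = True
--         elif c.isalpha() or c.isdigit():
--             word.append(c)
--         else:
--             out.extend(reversed(word))
--             word.clear()
--             out.append(c)
--     out.extend(reversed(word))
--     return "".join(out)
-- ===== Notes on version B (the rewrite author's own statement) =====
-- stated objective: faster
-- what changed: Replaces A's in-place list mutation with nested index-chasing while loops and slice-assignment by a single forward fold (state machine with an in-tag flag and a pending-word buffer) that builds the output incrementally; Pre_ excludes the strings with an unclosed '<', on which A raises IndexError.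
-- outside the precondition, e.g. on joyGo('<'): A raises IndexError, B returns '<'
import Mathlib
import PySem

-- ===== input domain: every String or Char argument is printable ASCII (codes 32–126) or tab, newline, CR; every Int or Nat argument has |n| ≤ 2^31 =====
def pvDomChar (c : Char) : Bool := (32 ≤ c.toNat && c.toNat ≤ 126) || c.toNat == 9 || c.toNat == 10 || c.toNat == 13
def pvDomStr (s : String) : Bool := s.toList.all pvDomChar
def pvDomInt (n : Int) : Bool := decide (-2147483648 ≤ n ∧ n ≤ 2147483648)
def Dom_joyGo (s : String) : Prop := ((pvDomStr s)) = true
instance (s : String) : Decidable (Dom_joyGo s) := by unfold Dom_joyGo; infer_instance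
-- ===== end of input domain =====

-- B replaces A's index-chasing while loops with in-place slice reversal by a single forward fold
-- (state machine: in-tag flag + pending-word buffer), a constant-factor speedup; equivalence of
-- return values on Pre_ (A raises IndexError on an unclosed '<', which Pre_ excludes).

-- `c.isalpha() or c.isdigit()` of both Pythons (exact on the ASCII domain)
def pvIsWord (c : Char) : Bool := PySem.Chars.isalpha c || PySem.Chars.isdigit c

-- ===== PORT A =====
-- inner `while s[idx] != ">" : idx += 1` (returns s.length where Python would raise IndexError)
def pvScanGt (s : List Char) (i : Nat) : Nat :=
  if h : i < s.length then
    if s[i] = '>' then i else pvScanGt s (i+1)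
  else i
termination_by s.length - i

-- inner `while (idx < len(s)) and (word char) : idx += 1`
def pvScanWord (s : List Char) (i : Nat) : Nat :=
  if h : i < s.length then
    if pvIsWord s[i] then pvScanWord s (i+1) else i
  else i
termination_by s.length - i

theorem pvScanGt_eq (s : List Char) (i : Nat) :
    pvScanGt s i = i + ((s.drop i).takeWhile (fun c => !(c = '>'))).length := by
  by_cases h : i < s.length
  · rw [pvScanGt, dif_pos h]
    have hd : s.drop i = s[i] :: s.drop (i+1) := List.drop_eq_getElem_cons h
    rw [hd, List.takeWhile]
    by_cases hgt : s[i] = '>'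
    · simp [hgt]
    · simp only [hgt]
      rw [pvScanGt_eq s (i+1)]
      simp
      omega
  · rw [pvScanGt, dif_neg h]
    simp [List.drop_eq_nil_of_le (by omega : s.length ≤ i)]
termination_by s.length - i

theorem pvScanWord_eq (s : List Char) (i : Nat) :
    pvScanWord s i = i + ((s.drop i).takeWhile pvIsWord).length := by
  by_cases h : i < s.length
  · rw [pvScanWord, dif_pos h]
    have hd : s.drop i = s[i] :: s.drop (i+1) := List.drop_eq_getElem_cons h
    rw [hd, List.takeWhile]
    by_cases hw : pvIsWord s[i]
    · simp only [hw]
      rw [pvScanWord_eq s (i+1)]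
      simp
      omega
    · simp [hw]
  · rw [pvScanWord, dif_neg h]
    simp [List.drop_eq_nil_of_le (by omega : s.length ≤ i)]
termination_by s.length - i

theorem pv_takeWhile_len_le {p : Char → Bool} (l : List Char) :
    (l.takeWhile p).length ≤ l.length := by
  induction l with
  | nil => simp
  | cons c r ih => rw [List.takeWhile]; cases p c <;> simp; omega

-- outer `while idx < len(s)` (word branch: `s[startIdx:idx] = s[startIdx:idx][::-1]`)
def pvLoopA (s : List Char) (idx : Nat) : List Char :=
  if h : idx < s.length then
    if s[idx] = '<' then
      pvLoopA s (pvScanGt s (idx+1) + 1)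
    else if pvIsWord s[idx] then
      let e := pvScanWord s idx
      pvLoopA (s.take idx ++ ((s.drop idx).take (e - idx)).reverse ++ s.drop e) e
    else
      pvLoopA s (idx+1)
  else s
termination_by s.length - idx
decreasing_by
  · have h1 : idx + 1 ≤ pvScanGt s (idx+1) := by rw [pvScanGt_eq]; omega
    omega
  · have h1w : idx + 1 ≤ pvScanWord s idx := by
      rw [pvScanWord_eq]
      have hd : s.drop idx = s[idx] :: s.drop (idx+1) := List.drop_eq_getElem_cons h
      rw [hd, List.takeWhile]
      simp_all
    have h2 : pvScanWord s idx ≤ s.length := by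
      rw [pvScanWord_eq]
      have := pv_takeWhile_len_le (p := pvIsWord) (s.drop idx)
      simp at this
      omega
    have h3 : (s.take idx ++ ((s.drop idx).take (pvScanWord s idx - idx)).reverse ++ s.drop (pvScanWord s idx)).length = s.length := by
      simp
      omega
    simp only [h3]
    omega
  · omega

def joyGo (s : String) : String := String.mk (pvLoopA s.toList 0)

-- ===== PORT B =====
-- one step of B's for-loop: state = (out, word, in_tag)
def pvStepB (st : List Char × List Char × Bool) (c : Char) : List Char × List Char × Bool :=
  match st with
  | (out, word, inTag) =>
    if inTag then (out ++ [c], word, !(c = '>'))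
    else if c = '<' then (out ++ word.reverse ++ [c], [], true)
    else if pvIsWord c then (out, word ++ [c], false)
    else (out ++ word.reverse ++ [c], [], false)

def joyGo_alt (s : String) : String :=
  match s.toList.foldl pvStepB ([], [], false) with
  | (out, word, _) => String.mk (out ++ word.reverse)

-- ===== PRECONDITION & SPEC =====
-- Pre_ excludes exactly the strings with a '<' having no later '>': there A raises IndexError.
def Pre_joyGo (s : String) : Prop :=
  ∀ i < s.toList.length, s.toList.getD i ' ' = '<' → '>' ∈ s.toList.drop (i+1)
instance (s : String) : Decidable (Pre_joyGo s) := by unfold Pre_joyGo; infer_instance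
def pvWitness_joyGo : String := "ab <t1>cd!"

def Spec_joyGo (s : String) (out : String) : Prop := out = joyGo_alt s
instance (s : String) (out : String) : Decidable (Spec_joyGo s out) := by unfold Spec_joyGo; infer_instance

-- ===== CLAIM (what is proved, stated in full; the proofs are below) =====
def Claim_equal_joyGo : Prop := ∀ (s : String), Dom_joyGo s → Pre_joyGo s → Spec_joyGo s (joyGo s)

-- ===== LEMMAS AND PROOFS =====

-- the common specification: normal mode pvR / tag mode pvT (consume through the next '>')
mutual
def pvR : List Char → List Char
  | [] => []
  | c :: r =>
    if c = '<' then '<' :: pvT r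
    else if pvIsWord c then
      (c :: r.takeWhile pvIsWord).reverse ++ pvR (r.dropWhile pvIsWord)
    else c :: pvR r
termination_by l => l.length
decreasing_by
  · simp
  · have := List.length_dropWhile_le pvIsWord r
    simp
    omega
  · simp
def pvT : List Char → List Char
  | [] => []
  | c :: r => if c = '>' then '>' :: pvR r else c :: pvT r
termination_by l => l.length
decreasing_by
  · simp
  · simp
end

theorem pv_dropWhile_eq_drop (p : Char → Bool) (l : List Char) :
    l.dropWhile p = l.drop (l.takeWhile p).length := by
  induction l with
  | nil => simp
  | cons c r ih =>
    rw [List.takeWhile, List.dropWhile]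
    cases hp : p c <;> simp [ih]

theorem pv_take_len (p : Char → Bool) (l : List Char) :
    l.take (l.takeWhile p).length = l.takeWhile p := by
  induction l with
  | nil => simp
  | cons c r ih =>
    rw [List.takeWhile]
    cases hp : p c <;> simp [ih]

theorem pvT_no_gt (l : List Char) (h : '>' ∉ l) : pvT l = l := by
  induction l with
  | nil => rw [pvT]
  | cons c r ih =>
    rw [pvT]
    simp at h
    have hc : ¬ c = '>' := fun he => h.1 he.symm
    simp [hc, ih h.2]

theorem pvT_split (a b : List Char) (h : '>' ∉ a) :
    pvT (a ++ '>' :: b) = a ++ '>' :: pvR b := by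
  induction a with
  | nil => simp [pvT]
  | cons c r ih =>
    simp at h
    rw [List.cons_append, pvT]
    have hc : ¬ c = '>' := fun he => h.1 he.symm
    simp [hc, ih h.2]

-- ---- A side: pvLoopA computes pvR on the unprocessed suffix ----
theorem pvLoopA_eq (s : List Char) (idx : Nat) :
    pvLoopA s idx = s.take idx ++ pvR (s.drop idx) := by
  by_cases h : idx < s.length
  · rw [pvLoopA, dif_pos h]
    have hd : s.drop idx = s[idx] :: s.drop (idx+1) := List.drop_eq_getElem_cons h
    by_cases hlt : s[idx] = '<'
    · rw [if_pos hlt]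
      set tw := (s.drop (idx+1)).takeWhile (fun c => !(c = '>')) with htwdef
      have hgeq : pvScanGt s (idx+1) = (idx+1) + tw.length := pvScanGt_eq s (idx+1)
      have htw := List.takeWhile_append_dropWhile (p := fun c => !(c = '>')) (l := s.drop (idx+1))
      have hlen1 : tw.length ≤ (s.drop (idx+1)).length := pv_takeWhile_len_le _
      have hlen1' : tw.length ≤ s.length - (idx+1) := by simpa using hlen1
      have hnogt : '>' ∉ tw := by
        intro hmem
        have := List.mem_takeWhile_imp hmem
        simp at this
      rw [pvLoopA_eq s (pvScanGt s (idx+1) + 1)]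
      rw [hd, pvR, if_pos hlt]
      cases hdw : (s.drop (idx+1)).dropWhile (fun c => !(c = '>')) with
      | nil =>
        have hsplit : s.drop (idx+1) = tw := by rw [← htw, hdw, List.append_nil]
        have hglen : pvScanGt s (idx+1) = s.length := by
          have h5 : tw.length = (s.drop (idx+1)).length := by rw [← hsplit]
          have h6 : (s.drop (idx+1)).length = s.length - (idx+1) := by simp
          omega
        rw [pvT_no_gt _ (by rw [hsplit]; exact hnogt)]
        have h1 : s.take (pvScanGt s (idx+1) + 1) = s := List.take_of_length_le (by omega)
        have h2 : s.drop (pvScanGt s (idx+1) + 1) = [] := List.drop_eq_nil_of_le (by omega)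
        rw [h1, h2]
        rw [show pvR ([] : List Char) = [] from by rw [pvR]]
        rw [List.append_nil]
        conv_lhs => rw [← List.take_append_drop idx s]
        rw [hd, hlt]
      | cons d b =>
        have hdgt : d = '>' := by
          have h0 := List.head?_dropWhile_not (p := fun c => !(c = '>')) (l := s.drop (idx+1))
          rw [hdw] at h0
          simp at h0
          exact h0
        subst hdgt
        have hsplit : s.drop (idx+1) = tw ++ '>' :: b := by rw [← htw, hdw]
        rw [hsplit, pvT_split _ _ hnogt]
        set g := pvScanGt s (idx+1) with hgdef
        have hb : s.drop (g+1) = b := by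
          have h1 : s.drop (g+1) = (s.drop (idx+1)).drop (tw.length + 1) := by
            rw [List.drop_drop]
            congr 1
            omega
          rw [h1, hsplit, List.drop_append]
          rw [List.drop_eq_nil_of_le (by omega : tw.length ≤ tw.length + 1)]
          rw [show tw.length + 1 - tw.length = 1 from by omega]
          simp
        have hglen : g < s.length := by
          have : (s.drop (idx+1)).length = tw.length + 1 + b.length := by rw [hsplit]; simp; omega
          simp at this
          omega
        have htake : s.take (g+1) = s.take idx ++ '<' :: (tw ++ ['>']) := by
          have h1 : s.take (g+1) = s.take idx ++ (s.drop idx).take (g+1-idx) := by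
            conv_lhs => rw [show g + 1 = idx + (g+1-idx) from by omega, List.take_add]
          rw [h1, hd, hsplit]
          have h2 : g + 1 - idx = (tw.length + 1) + 1 := by omega
          rw [h2, List.take_succ_cons]
          congr 2
          rw [List.take_append]
          rw [List.take_of_length_le (by omega : tw.length ≤ tw.length + 1)]
          rw [show tw.length + 1 - tw.length = 1 from by omega]
          rfl
        rw [hb, htake]
        simp
    · by_cases hw : pvIsWord s[idx]
      · rw [if_neg hlt, if_pos hw]
        set tw := (s.drop idx).takeWhile pvIsWord with htwdef
        have hgeq : pvScanWord s idx = idx + tw.length := pvScanWord_eq s idx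
        have htw := List.takeWhile_append_dropWhile (p := pvIsWord) (l := s.drop idx)
        have hlen1 : tw.length ≤ (s.drop idx).length := pv_takeWhile_len_le _
        have hlen1' : tw.length ≤ s.length - idx := by simpa using hlen1
        have htwpos : 1 ≤ tw.length := by
          rw [htwdef, hd, List.takeWhile]
          simp [hw]
        set e := pvScanWord s idx with hedef
        have htake_seg : (s.drop idx).take (e - idx) = tw := by
          have h1 : e - idx = tw.length := by omega
          rw [h1, htwdef]
          exact pv_take_len pvIsWord (s.drop idx)
        have hdropW : (s.drop idx).dropWhile pvIsWord = s.drop e := by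
          rw [pv_dropWhile_eq_drop, List.drop_drop]
          congr 1
          have hfold : (List.takeWhile pvIsWord (List.drop idx s)).length = tw.length := by
            rw [htwdef]
          omega
        set s' := s.take idx ++ ((s.drop idx).take (e - idx)).reverse ++ s.drop e with hs'def
        have hslen : s'.length = s.length := by
          rw [hs'def]
          simp
          omega
        have hAlen : (s.take idx).length = idx := by
          simp
          omega
        have hBlen : tw.reverse.length = e - idx := by
          simp
          omega
        rw [pvLoopA_eq s' e]
        have htake' : s'.take e = s.take idx ++ tw.reverse := by
          rw [hs'def, htake_seg, List.append_assoc, List.take_append, hAlen]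
          rw [List.take_of_length_le (by rw [hAlen]; omega : (s.take idx).length ≤ e)]
          rw [List.take_append]
          rw [List.take_of_length_le (le_of_eq hBlen)]
          rw [show e - idx - tw.reverse.length = 0 from by rw [hBlen]; omega]
          simp
        have hdrop' : s'.drop e = s.drop e := by
          rw [hs'def, htake_seg, List.append_assoc, List.drop_append, hAlen]
          rw [List.drop_eq_nil_of_le (by rw [hAlen]; omega : (s.take idx).length ≤ e)]
          rw [List.nil_append, List.drop_append]
          rw [List.drop_eq_nil_of_le (le_of_eq hBlen)]
          rw [List.nil_append]
          rw [show e - idx - tw.reverse.length = 0 from by rw [hBlen]; omega]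
          rw [List.drop_zero]
        rw [htake', hdrop']
        -- RHS: unfold pvR on the word run
        rw [hd, pvR]
        have hlt' : ¬ (s[idx] = '<') := hlt
        rw [if_neg hlt', if_pos hw]
        have htw_cons : tw = s[idx] :: (s.drop (idx+1)).takeWhile pvIsWord := by
          rw [htwdef, hd, List.takeWhile, hw]
        have hdw_cons : (s.drop (idx+1)).dropWhile pvIsWord = s.drop e := by
          rw [← hdropW]
          conv_rhs => rw [hd]
          rw [List.dropWhile_cons]
          simp [hw]
        rw [← htw_cons, hdw_cons]
        simp
      · rw [if_neg hlt, if_neg hw]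
        rw [pvLoopA_eq s (idx+1)]
        rw [hd, pvR, if_neg hlt, if_neg (by simp [hw])]
        have ht : List.take (idx+1) s = List.take idx s ++ [s[idx]] := by
          rw [List.take_succ, List.getElem?_eq_getElem h]
          rfl
        rw [ht, List.append_assoc, List.singleton_append]
  · rw [pvLoopA, dif_neg h]
    rw [List.drop_eq_nil_of_le (by omega), List.take_of_length_le (by omega), pvR]
    simp
termination_by s.length - idx
decreasing_by
  all_goals have _h1 : idx + 1 ≤ pvScanGt s (idx+1) := by rw [pvScanGt_eq]; omega
  all_goals try simp only [List.length_append, List.length_reverse, List.length_take, List.length_drop]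
  all_goals omega

-- ---- B side: the fold computes pvR ----
def pvGlue (st : List Char × List Char × Bool) : List Char := st.1 ++ st.2.1.reverse

theorem pvFold_run (u : List Char) (hu : ∀ c ∈ u, pvIsWord c = true) :
    ∀ (rest out w : List Char),
      List.foldl pvStepB (out, w, false) (u ++ rest) = List.foldl pvStepB (out, w ++ u, false) rest := by
  induction u with
  | nil => intro rest out w; simp
  | cons c cu ih =>
    intro rest out w
    have hc : pvIsWord c = true := hu c (by simp)
    have hcne : ¬ (c = '<') := by
      intro hEq
      rw [hEq] at hc
      exact absurd hc (by decide)
    rw [List.cons_append, List.foldl_cons]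
    rw [pvStepB]
    rw [if_neg (by simp), if_neg hcne, if_pos hc]
    rw [ih (fun d hd => hu d (by simp [hd])) rest out (w ++ [c])]
    simp

theorem pvFold_spec (n : Nat) :
    ∀ (l : List Char), l.length ≤ n → ∀ (out : List Char),
      (pvGlue (List.foldl pvStepB (out, ([] : List Char), false) l) = out ++ pvR l ∧
       pvGlue (List.foldl pvStepB (out, ([] : List Char), true) l) = out ++ pvT l) := by
  induction n with
  | zero =>
    intro l hl out
    have : l = [] := List.eq_nil_of_length_eq_zero (by omega)
    subst this
    simp [pvGlue, pvR, pvT]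
  | succ n ih =>
    intro l hl out
    cases l with
    | nil => simp [pvGlue, pvR, pvT]
    | cons c r =>
      simp at hl
      constructor
      · by_cases hlt : c = '<'
        · subst hlt
          rw [List.foldl_cons, pvStepB]
          rw [if_neg (by simp), if_pos rfl]
          simp only [List.reverse_nil, List.append_nil]
          rw [(ih r (by omega) (out ++ ['<'])).2]
          rw [pvR, if_pos rfl]
          simp
        · by_cases hw : pvIsWord c
          · set tw := (c :: r).takeWhile pvIsWord with htwdef
            set dw := (c :: r).dropWhile pvIsWord with hdwdef
            have htw : tw ++ dw = c :: r := List.takeWhile_append_dropWhile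
            have htwall : ∀ d ∈ tw, pvIsWord d = true := fun d hd => List.mem_takeWhile_imp hd
            have hrun : List.foldl pvStepB (out, [], false) (c :: r) = List.foldl pvStepB (out, tw, false) dw := by
              conv_lhs => rw [← htw]
              rw [pvFold_run tw htwall dw out []]
              simp
            have htw_cons : tw = c :: r.takeWhile pvIsWord := by
              rw [htwdef, List.takeWhile, hw]
            have hdw_eq : dw = r.dropWhile pvIsWord := by
              rw [hdwdef, List.dropWhile]
              simp [hw]
            have hRHS : pvR (c :: r) = tw.reverse ++ pvR dw := by
              rw [pvR, if_neg hlt, if_pos hw, htw_cons, hdw_eq]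
            rw [hrun, hRHS]
            have hdwlen : dw.length ≤ r.length := by
              rw [hdw_eq]
              exact List.length_dropWhile_le _ _
            cases hdwc : dw with
            | nil => simp [pvGlue, pvR]
            | cons d dr =>
              have hdnw : ¬ (pvIsWord d = true) := by
                have h0 := List.head?_dropWhile_not (p := pvIsWord) (l := c :: r)
                rw [← hdwdef, hdwc] at h0
                simp at h0
                simp [h0]
              have hdrlen : dr.length ≤ n := by
                rw [hdwc] at hdwlen
                simp at hdwlen
                omega
              rw [List.foldl_cons, pvStepB]
              by_cases hdlt : d = '<'
              · rw [if_neg (by simp), if_pos hdlt]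
                rw [(ih dr hdrlen (out ++ tw.reverse ++ [d])).2]
                rw [pvR, if_pos hdlt, hdlt]
                simp
              · rw [if_neg (by simp), if_neg hdlt, if_neg hdnw]
                rw [(ih dr hdrlen (out ++ tw.reverse ++ [d])).1]
                rw [pvR, if_neg hdlt, if_neg hdnw]
                simp
          · rw [List.foldl_cons, pvStepB]
            rw [if_neg (by simp), if_neg hlt, if_neg hw]
            simp only [List.reverse_nil, List.append_nil]
            rw [(ih r (by omega) (out ++ [c])).1]
            rw [pvR, if_neg hlt, if_neg hw]
            simp
      · rw [List.foldl_cons, pvStepB, if_pos rfl]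
        by_cases hgt : c = '>'
        · subst hgt
          simp only [decide_true, Bool.not_true]
          rw [(ih r (by omega) (out ++ ['>'])).1]
          rw [pvT, if_pos rfl]
          simp
        · rw [show (!decide (c = '>')) = true by simp [hgt]]
          rw [(ih r (by omega) (out ++ [c])).2]
          rw [pvT, if_neg hgt]
          simp

theorem joyGo_alt_eq (s : String) : joyGo_alt s = String.mk (pvR s.toList) := by
  have h := (pvFold_spec s.toList.length s.toList le_rfl []).1
  rw [joyGo_alt]
  cases hfold : List.foldl pvStepB ([], [], false) s.toList with
  | mk out rest =>
    cases rest with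
    | mk word flag =>
      rw [hfold] at h
      simp only [pvGlue] at h
      show String.mk (out ++ word.reverse) = String.mk (pvR s.toList)
      rw [h, List.nil_append]

-- ===== VERDICT (by name: the statement is the Claim_ definition above) =====
theorem joyGo_spec : Claim_equal_joyGo := by
  intro s _ _
  unfold Spec_joyGo joyGo
  rw [joyGo_alt_eq, pvLoopA_eq]
  simp
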